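-- pv_equiv track=rewrite | github.com/vuminhduc796/Voicify | preprocess_data/android/generate_SCFG_examples.py | replace_one_token
-- ===== SOURCE A (Python) =====
-- def replace_one_token(current_str, lhs, sub_rhs_str):
-- 	token_list = []
-- 	is_replaced = False
-- 	for token in current_str.split(' '):
-- 		if token == lhs and not is_replaced:
-- 			token_list.append(sub_rhs_str)
-- 			is_replaced = True
-- 		else:
-- 			token_list.append(token)
-- 	return " ".join(token_list)
-- ===== SOURCE B (Python) =====
-- def replace_one_token(current_str, lhs, sub_rhs_str):
--     # String-level algorithm: tokens of split(' ') are exactly the maximal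
--     # space-free segments between sentinel-padded single spaces, so the first
--     # token equal to lhs is the first occurrence of ' '+lhs+' ' in the padded
--     # string (valid because lhs is space-free; a space-containing lhs can
--     # never equal a token, so nothing is replaced then).
--     if ' ' in lhs:
--         return current_str
--     padded = ' ' + current_str + ' '
--     i = padded.find(' ' + lhs + ' ')
--     if i == -1:
--         return current_str
--     res = padded[:i + 1] + sub_rhs_str + padded[i + 1 + len(lhs):]
--     return res[1:-1]
-- ===== Notes on version B (the rewrite author's own statement) =====
-- stated objective: alternative
-- what changed: B never builds a token list: it pads the string with sentinel spaces, locates the first occurrence of the substring ' '+lhs+' ' with str.find, splices the replacement in by slicing, and strips the sentinels (a space-containing lhs can never equal a token, so it returns the input unchanged there).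
import Mathlib
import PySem

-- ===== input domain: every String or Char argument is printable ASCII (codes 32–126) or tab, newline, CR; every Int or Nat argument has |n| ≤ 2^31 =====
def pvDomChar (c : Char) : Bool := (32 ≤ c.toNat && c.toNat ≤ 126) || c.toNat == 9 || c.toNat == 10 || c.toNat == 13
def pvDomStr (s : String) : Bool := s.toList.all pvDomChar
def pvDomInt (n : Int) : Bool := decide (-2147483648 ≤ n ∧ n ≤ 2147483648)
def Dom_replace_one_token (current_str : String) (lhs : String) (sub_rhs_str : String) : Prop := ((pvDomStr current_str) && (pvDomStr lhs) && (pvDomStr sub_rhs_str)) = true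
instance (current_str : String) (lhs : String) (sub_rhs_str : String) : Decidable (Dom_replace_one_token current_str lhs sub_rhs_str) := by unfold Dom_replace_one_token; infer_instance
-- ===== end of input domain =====

-- B replaces the tokenize/flagged-scan/join of A by a string-level algorithm (pad with
-- sentinel spaces, find the first substring occurrence of ' '+lhs+' ', splice, strip);
-- objective: alternative (no token list is ever built).

-- ===== PORT A =====
-- loop state: (token_list, is_replaced); split(' ') with nonempty separator " " via split?.getD
def replace_one_token (current_str : String) (lhs : String) (sub_rhs_str : String) : String :=
  let st := ((PySem.Str.split? current_str " ").getD []).foldl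
    (fun (st : List String × Bool) token =>
      if token = lhs ∧ st.2 = false then (st.1 ++ [sub_rhs_str], true)
      else (st.1 ++ [token], st.2))
    ([], false)
  PySem.Str.join " " st.1

-- ===== PORT B =====
-- string concatenation / slicing done on .toList (exact: Python str concat/slices are
-- list concat/slices of the code points); in the last branch 0 ≤ i, so padded[:i+1] is
-- take (i.toNat+1), padded[i+1+len(lhs):] is drop (i.toNat+1+len lhs), res[1:-1] is drop 1 + dropLast
def replace_one_token_alt (current_str : String) (lhs : String) (sub_rhs_str : String) : String :=
  if PySem.Str.isIn " " lhs then current_str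
  else
    let padded : List Char := ' ' :: current_str.toList ++ [' ']
    let i : Int := PySem.Chars.find padded (' ' :: lhs.toList ++ [' '])
    if i = -1 then current_str
    else
      let res : List Char :=
        padded.take (i.toNat + 1) ++ sub_rhs_str.toList ++ padded.drop (i.toNat + 1 + lhs.toList.length)
      String.ofList ((res.drop 1).dropLast)

-- ===== PRECONDITION & SPEC =====
def Spec_replace_one_token (current_str : String) (lhs : String) (sub_rhs_str : String) (out : String) : Prop := out = replace_one_token_alt current_str lhs sub_rhs_str
instance (current_str : String) (lhs : String) (sub_rhs_str : String) (out : String) : Decidable (Spec_replace_one_token current_str lhs sub_rhs_str out) := by unfold Spec_replace_one_token; infer_instance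

-- ===== CLAIM (what is proved, stated in full; the proofs are below) =====
def Claim_equal_replace_one_token : Prop := ∀ (current_str : String) (lhs : String) (sub_rhs_str : String), Dom_replace_one_token current_str lhs sub_rhs_str → Spec_replace_one_token current_str lhs sub_rhs_str (replace_one_token current_str lhs sub_rhs_str)

-- ===== LEMMAS AND PROOFS =====

-- ---- A-side: the flagged loop is "replace the first occurrence" ----

-- once the flag is set, the loop only appends the remaining tokens
lemma foldA_true (lhs sub : String) (ts : List String) (acc : List String) :
    ts.foldl (fun (st : List String × Bool) token =>
        if token = lhs ∧ st.2 = false then (st.1 ++ [sub], true)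
        else (st.1 ++ [token], st.2)) (acc, true) = (acc ++ ts, true) := by
  induction ts generalizing acc with
  | nil => simp
  | cons t ts ih => simp [ih]

-- the loop from a clear flag replaces the token at the first index where lhs occurs
lemma foldA_false (lhs sub : String) (ts : List String) (acc : List String) :
    ts.foldl (fun (st : List String × Bool) token =>
        if token = lhs ∧ st.2 = false then (st.1 ++ [sub], true)
        else (st.1 ++ [token], st.2)) (acc, false) =
      match PySem.List.index? ts lhs with
      | some i => (acc ++ ts.set i sub, true)
      | none => (acc ++ ts, false) := by
  induction ts generalizing acc with
  | nil => simp
  | cons t ts ih =>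
    by_cases h : t = lhs
    · subst h
      rw [PySem.List.index?_cons_self]
      simp [foldA_true]
    · rw [PySem.List.index?_cons_of_ne ts h, List.foldl_cons, if_neg (by simp [h]), ih]
      cases PySem.List.index? ts lhs with
      | none => simp
      | some i => simp

-- ---- splitOn with separator " " as a simple structural recursion ----

def pvSpl : List Char → List (List Char)
  | [] => [[]]
  | c :: r =>
    if c = ' ' then [] :: pvSpl r
    else
      match pvSpl r with
      | [] => [[c]]          -- unreachable: pvSpl never returns []
      | t :: ts => (c :: t) :: ts

lemma pvSpl_ne_nil (l : List Char) : pvSpl l ≠ [] := by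
  cases l with
  | nil => simp [pvSpl]
  | cons c r =>
    simp only [pvSpl]
    split <;> [simp; (split <;> simp)]

lemma pvSpl_space_free (l : List Char) : ∀ t ∈ pvSpl l, ' ' ∉ t := by
  induction l with
  | nil => simp [pvSpl]
  | cons c r ih =>
    simp only [pvSpl]
    split
    · intro t ht
      rcases List.mem_cons.mp ht with h | h
      · simp [h]
      · exact ih t h
    · rename_i hc
      cases hspl : pvSpl r with
      | nil => exact absurd hspl (pvSpl_ne_nil r)
      | cons t0 ts =>
        intro t ht
        rcases List.mem_cons.mp ht with h | h
        · subst h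
          intro hmem
          rcases List.mem_cons.mp hmem with h | h
          · exact hc h.symm
          · exact ih t0 (hspl ▸ List.mem_cons_self) h
        · exact ih t (hspl ▸ List.mem_cons_of_mem _ h)

lemma intercalate_pvSpl (l : List Char) : PySem.Chars.join [' '] (pvSpl l) = l := by
  induction l with
  | nil => simp [pvSpl, PySem.Chars.join, List.intercalate]
  | cons c r ih =>
    simp only [pvSpl]
    cases hspl : pvSpl r with
    | nil => exact absurd hspl (pvSpl_ne_nil r)
    | cons t ts =>
      rw [hspl] at ih
      by_cases hc : c = ' '
      · subst hc
        rw [if_pos rfl, PySem.Chars.join_cons_cons, ih]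
        rfl
      · rw [if_neg hc]
        cases ts with
        | nil => simpa [PySem.Chars.join, List.intercalate] using congrArg (c :: ·) ih
        | cons u us =>
          rw [PySem.Chars.join_cons_cons] at ih ⊢
          simp only [← ih]
          simp

-- PySem's splitOn.go on separator " " computes pvSpl (fuel ≥ length suffices)
lemma splitOn_go_eq (fuel : Nat) : ∀ (l cur : List Char) (acc : List (List Char)),
    l.length ≤ fuel → ∀ t ts, pvSpl l = t :: ts →
    PySem.Chars.splitOn.go [' '] fuel l cur acc = acc.reverse ++ (cur.reverse ++ t) :: ts := by
  induction fuel with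
  | zero =>
    intro l cur acc hlen t ts hspl
    have : l = [] := List.length_eq_zero_iff.mp (Nat.le_zero.mp hlen)
    subst this
    simp [pvSpl] at hspl
    simp [PySem.Chars.splitOn.go, hspl.1, hspl.2]
  | succ fuel ih =>
    intro l cur acc hlen t ts hspl
    cases l with
    | nil =>
      simp [pvSpl] at hspl
      simp [PySem.Chars.splitOn.go, hspl.1, hspl.2]
    | cons c r =>
      have hr' : r.length ≤ fuel := by simpa using hlen
      by_cases hc : c = ' '
      · subst hc
        have hpre : [' '].isPrefixOf (' ' :: r) = true := by simp [List.isPrefixOf]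
        simp only [pvSpl] at hspl
        have ht : ([] : List Char) = t := (List.cons_eq_cons.mp hspl).1
        have hts : pvSpl r = ts := (List.cons_eq_cons.mp hspl).2
        cases hr : pvSpl r with
        | nil => exact absurd hr (pvSpl_ne_nil r)
        | cons u us =>
          have hgo := ih r [] (cur.reverse :: acc) hr' u us hr
          simp only [PySem.Chars.splitOn.go, hpre]
          simp only [List.length_cons, List.length_nil, List.drop_succ_cons, List.drop_zero,
            if_true]
          rw [hgo]
          rw [← ht, ← hts, hr]
          simp
      · have hpre : [' '].isPrefixOf (c :: r) = false := by
          simp [List.isPrefixOf, Ne.symm hc]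
        simp only [pvSpl, if_neg hc] at hspl
        cases hr : pvSpl r with
        | nil => exact absurd hr (pvSpl_ne_nil r)
        | cons u us =>
          rw [hr] at hspl
          obtain ⟨ht, hts⟩ := List.cons_eq_cons.mp hspl
          have hgo := ih r (c :: cur) acc hr' u us hr
          simp only [PySem.Chars.splitOn.go, hpre, Bool.false_eq_true, if_false]
          rw [hgo, ← ht, hts]
          simp

lemma splitOn_eq_pvSpl (l : List Char) : PySem.Chars.splitOn l [' '] = pvSpl l := by
  cases hspl : pvSpl l with
  | nil => exact absurd hspl (pvSpl_ne_nil l)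
  | cons t ts =>
    unfold PySem.Chars.splitOn
    rw [splitOn_go_eq (l.length + 1) l [] [] (Nat.le_succ _) t ts hspl]
    simp

-- ---- the padded string and token positions ----

def pvBlocks (T : List (List Char)) : List Char := (T.map (fun t => ' ' :: t)).flatten

def pvPos : List (List Char) → Nat → Nat
  | _, 0 => 0
  | [], _ + 1 => 0
  | t :: ts, j + 1 => t.length + 1 + pvPos ts j

lemma pvBlocks_append (X Y : List (List Char)) : pvBlocks (X ++ Y) = pvBlocks X ++ pvBlocks Y := by
  simp [pvBlocks]

lemma pvBlocks_eq (T : List (List Char)) (hT : T ≠ []) :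
    pvBlocks T = ' ' :: PySem.Chars.join [' '] T := by
  induction T with
  | nil => exact absurd rfl hT
  | cons t ts ih =>
    cases ts with
    | nil => simp [pvBlocks, PySem.Chars.join, List.intercalate]
    | cons u us =>
      simp only [pvBlocks, List.map_cons, List.flatten_cons] at ih ⊢
      rw [ih (by simp), PySem.Chars.join_cons_cons]
      simp

lemma pvBlocks_cons_head (T : List (List Char)) : ∃ R, pvBlocks T ++ [' '] = ' ' :: R := by
  cases T with
  | nil => exact ⟨[], rfl⟩
  | cons t ts => exact ⟨t ++ (pvBlocks ts ++ [' ']), by simp [pvBlocks]⟩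

lemma pvPos_lt (T : List (List Char)) : ∀ j j', j < j' → j' ≤ T.length → pvPos T j < pvPos T j' := by
  induction T with
  | nil => intro j j' h h'; simp at h'; omega
  | cons t ts ih =>
    intro j j' h h'
    cases j' with
    | zero => omega
    | succ js' =>
      have hle : js' ≤ ts.length := by simp at h'; omega
      cases j with
      | zero => simp [pvPos]
      | succ js =>
        simp only [pvPos]
        have := ih js js' (by omega) hle
        omega

lemma pvPos_eq_length (T : List (List Char)) : ∀ j, j ≤ T.length → pvPos T j = (pvBlocks (T.take j)).length := by
  induction T with
  | nil =>
    intro j h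
    have : j = 0 := by simpa using h
    subst this
    simp [pvPos, pvBlocks]
  | cons t ts ih =>
    intro j h
    cases j with
    | zero => simp [pvPos, pvBlocks]
    | succ j' =>
      simp only [pvPos, List.take_succ_cons, pvBlocks, List.map_cons, List.flatten_cons,
        List.length_append, List.length_cons]
      rw [ih j' (by simpa using h)]
      simp [pvBlocks]

-- a needle " lhs " prefixes the head block iff the head token IS lhs
lemma head_match (t L R : List Char) (ht : ' ' ∉ t) (hL : ' ' ∉ L) :
    (L ++ [' ']) <+: (t ++ (' ' :: R)) ↔ t = L := by
  constructor
  · intro h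
    induction L generalizing t with
    | nil =>
      cases t with
      | nil => rfl
      | cons c t' =>
        exfalso
        simp only [List.nil_append, List.cons_append] at h
        obtain ⟨hc, -⟩ := List.cons_prefix_cons.mp h
        exact ht (by simp [← hc])
    | cons a L' ihL =>
      cases t with
      | nil =>
        exfalso
        simp only [List.cons_append, List.nil_append] at h
        obtain ⟨hc, -⟩ := List.cons_prefix_cons.mp h
        exact hL (by simp [hc])
      | cons c t' =>
        simp only [List.cons_append] at h
        obtain ⟨hc, h'⟩ := List.cons_prefix_cons.mp h
        have := ihL t' (fun hm => ht (List.mem_cons_of_mem _ hm))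
          (fun hm => hL (List.mem_cons_of_mem _ hm)) h'
        simp [this, hc]
  · rintro rfl
    have : (t ++ [' ']) ++ R = t ++ (' ' :: R) := by simp
    rw [← this]
    exact List.prefix_append _ _

-- match positions of " lhs " in the padded string are exactly the positions of tokens equal to lhs
lemma pvMatch_iff (T : List (List Char)) (hT : ∀ t ∈ T, ' ' ∉ t) (L : List Char) (hL : ' ' ∉ L) :
    ∀ i : Nat, ((' ' :: (L ++ [' '])) <+: (pvBlocks T ++ [' ']).drop i ↔
      ∃ j, ∃ hj : j < T.length, T[j] = L ∧ i = pvPos T j) := by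
  induction T with
  | nil =>
    intro i
    constructor
    · intro h
      have hle := h.length_le
      simp [pvBlocks] at hle
      omega
    · rintro ⟨j, hj, -⟩
      simp at hj
  | cons t ts ih =>
    have ht : ' ' ∉ t := hT t List.mem_cons_self
    have hts : ∀ u ∈ ts, ' ' ∉ u := fun u hu => hT u (List.mem_cons_of_mem _ hu)
    have ihts := ih hts
    intro i
    have hblk : pvBlocks (t :: ts) ++ [' '] = ' ' :: (t ++ (pvBlocks ts ++ [' '])) := by
      simp [pvBlocks]
    obtain ⟨R, hR⟩ := pvBlocks_cons_head ts
    match i with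
    | 0 =>
      rw [hblk]
      simp only [List.drop_zero]
      constructor
      · intro h
        have h' := (List.cons_prefix_cons.mp h).2
        rw [hR] at h'
        have := (head_match t L R ht hL).mp h'
        exact ⟨0, by simp, by simpa using this, rfl⟩
      · rintro ⟨j, hj, hTj, hpos⟩
        have hj0 : j = 0 := by
          cases j with
          | zero => rfl
          | succ j' =>
            exfalso
            rw [show pvPos (t :: ts) (j' + 1) = t.length + 1 + pvPos ts j' from rfl] at hpos
            omega
        subst hj0
        simp only [List.getElem_cons_zero] at hTj
        refine List.cons_prefix_cons.mpr ⟨rfl, ?_⟩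
        rw [hR]
        exact (head_match t L R ht hL).mpr hTj
    | Nat.succ i' =>
      rw [hblk]
      simp only [List.drop_succ_cons]
      by_cases hi : i' < t.length
      · constructor
        · intro h
          exfalso
          obtain ⟨rest, hrest⟩ := h
          have h0 : (List.drop i' (t ++ (pvBlocks ts ++ [' '])))[0]? = some ' ' := by
            rw [← hrest]; rfl
          rw [List.getElem?_drop, List.getElem?_append_left (by simpa using hi),
            List.getElem?_eq_getElem (by simpa using hi)] at h0
          exact ht ((Option.some_inj.mp h0) ▸ List.getElem_mem (by simpa using hi))
        · rintro ⟨j, hj, hTj, hpos⟩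
          exfalso
          cases j with
          | zero =>
            rw [show pvPos (t :: ts) 0 = 0 from rfl] at hpos
            omega
          | succ j' =>
            rw [show pvPos (t :: ts) (j' + 1) = t.length + 1 + pvPos ts j' from rfl] at hpos
            omega
      · have hdrop : (t ++ (pvBlocks ts ++ [' '])).drop i' = (pvBlocks ts ++ [' ']).drop (i' - t.length) := by
          rw [List.drop_append, List.drop_eq_nil_of_le (by omega)]
          simp
        rw [hdrop, ihts (i' - t.length)]
        constructor
        · rintro ⟨j', hj', hTj', hpos'⟩
          refine ⟨j' + 1, by simpa using Nat.succ_lt_succ hj', by simpa using hTj', ?_⟩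
          simp only [pvPos]
          omega
        · rintro ⟨j, hj, hTj, hpos⟩
          cases j with
          | zero => simp [pvPos] at hpos
          | succ j' =>
            simp only [pvPos] at hpos
            refine ⟨j', by simpa using hj, by simpa using hTj, by omega⟩

-- find on the padded string: -1 when lhs is not a token …
lemma find_padded_none (T : List (List Char)) (hT : ∀ t ∈ T, ' ' ∉ t) (L : List Char)
    (hL : ' ' ∉ L) (hnot : L ∉ T) :
    PySem.Chars.find (pvBlocks T ++ [' ']) (' ' :: (L ++ [' '])) = -1 := by
  rw [PySem.Chars.find_eq_neg_one_iff]
  intro hinf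
  have hisin : PySem.Chars.isIn (' ' :: (L ++ [' '])) (pvBlocks T ++ [' ']) = true :=
    (PySem.Chars.isIn_iff_infix _ _).mpr hinf
  obtain ⟨j, hj⟩ := (PySem.Chars.exists_prefix_drop_iff_isIn _ _).mpr hisin
  obtain ⟨j', hj', hTj, -⟩ := (pvMatch_iff T hT L hL j).mp hj
  exact hnot (hTj ▸ List.getElem_mem hj')

-- … and the position of the FIRST matching token when there is one
lemma find_padded_some (T : List (List Char)) (hT : ∀ t ∈ T, ' ' ∉ t) (L : List Char)
    (hL : ' ' ∉ L) (j : Nat) (hj : j < T.length) (hTj : T[j] = L)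
    (hmin : ∀ k, (hk : k < T.length) → k < j → T[k] ≠ L) :
    PySem.Chars.find (pvBlocks T ++ [' ']) (' ' :: (L ++ [' '])) = (pvPos T j : Int) := by
  have hmatch : (' ' :: (L ++ [' '])) <+: (pvBlocks T ++ [' ']).drop (pvPos T j) :=
    (pvMatch_iff T hT L hL _).mpr ⟨j, hj, hTj, rfl⟩
  have hinf : (' ' :: (L ++ [' '])) <:+: (pvBlocks T ++ [' ']) :=
    List.infix_iff_prefix_suffix.mpr ⟨_, hmatch, List.drop_suffix _ _⟩
  have h0 : 0 ≤ PySem.Chars.find (pvBlocks T ++ [' ']) (' ' :: (L ++ [' '])) :=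
    (PySem.Chars.find_nonneg_iff _ _).mpr hinf
  obtain ⟨hpre, hfirst⟩ := PySem.Chars.find_spec h0
  obtain ⟨j₁, hj₁, hTj₁, hpos₁⟩ := (pvMatch_iff T hT L hL _).mp hpre
  have hj₁j : j₁ = j := by
    rcases Nat.lt_trichotomy j₁ j with h | h | h
    · exact absurd hTj₁ (hmin j₁ hj₁ h)
    · exact h
    · exfalso
      have hlt : pvPos T j < pvPos T j₁ := pvPos_lt T j j₁ h (by omega)
      exact hfirst (pvPos T j) (by omega) hmatch
  subst hj₁j
  omega

-- slicing the padded string at the match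
lemma padded_decomp (T : List (List Char)) (L : List Char) (j : Nat) (hj : j < T.length)
    (hTj : T[j] = L) :
    pvBlocks T ++ [' '] = pvBlocks (T.take j) ++ ((' ' :: L) ++ (pvBlocks (T.drop (j + 1)) ++ [' '])) := by
  conv_lhs => rw [← List.take_append_drop j T]
  rw [List.drop_eq_getElem_cons hj, hTj, pvBlocks_append]
  simp [pvBlocks]

lemma padded_take (T : List (List Char)) (L : List Char) (j : Nat) (hj : j < T.length)
    (hTj : T[j] = L) :
    (pvBlocks T ++ [' ']).take (pvPos T j + 1) = pvBlocks (T.take j) ++ [' '] := by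
  rw [padded_decomp T L j hj hTj, pvPos_eq_length T j (by omega),
    List.take_length_add_append]
  simp

lemma padded_drop (T : List (List Char)) (L : List Char) (j : Nat) (hj : j < T.length)
    (hTj : T[j] = L) :
    (pvBlocks T ++ [' ']).drop (pvPos T j + 1 + L.length) = pvBlocks (T.drop (j + 1)) ++ [' '] := by
  rw [padded_decomp T L j hj hTj, pvPos_eq_length T j (by omega)]
  have : (pvBlocks (T.take j)).length + 1 + L.length
       = (pvBlocks (T.take j)).length + (1 + L.length) := by omega
  rw [this, List.drop_length_add_append]
  have h1 : 1 + L.length = (' ' :: L).length := by simp; omega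
  rw [h1, List.drop_left]

-- stripping the two sentinel spaces recovers the join
lemma padded_strip (T : List (List Char)) (hT : T ≠ []) :
    (((pvBlocks T ++ [' ']).drop 1).dropLast) = PySem.Chars.join [' '] T := by
  rw [pvBlocks_eq T hT]
  simp only [List.cons_append, List.drop_succ_cons, List.drop_zero]
  exact List.dropLast_concat

-- index? over the ofList-mapped token list is index? over the raw lists
lemma index?_map_ofList (T : List (List Char)) (s : String) :
    PySem.List.index? (T.map String.ofList) s = PySem.List.index? T s.toList := by
  induction T with
  | nil => rfl
  | cons t ts ih =>
    by_cases h : t = s.toList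
    · subst h
      rw [List.map_cons, String.ofList_toList, PySem.List.index?_cons_self, PySem.List.index?_cons_self]
    · rw [List.map_cons,
        PySem.List.index?_cons_of_ne _ (fun hc => h (by rw [← hc]; simp)),
        PySem.List.index?_cons_of_ne _ h, ih]

-- ===== VERDICT (by name: the statement is the Claim_ definition above) =====
theorem replace_one_token_spec : Claim_equal_replace_one_token := by
  intro c lhs sub _
  unfold Spec_replace_one_token replace_one_token replace_one_token_alt
  simp only
  have hsep : (" " : String).toList = [' '] := by decide
  have htoksp : (PySem.Str.split? c " ").getD [] = (pvSpl c.toList).map String.ofList := by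
    simp [PySem.Str.split?, PySem.Chars.split?, hsep, splitOn_eq_pvSpl]
  rw [htoksp, foldA_false]
  have hTne : pvSpl c.toList ≠ [] := pvSpl_ne_nil _
  have hTfree : ∀ t ∈ pvSpl c.toList, ' ' ∉ t := pvSpl_space_free _
  have hjoin : PySem.Chars.join [' '] (pvSpl c.toList) = c.toList := intercalate_pvSpl _
  have hpadded : ' ' :: c.toList ++ [' '] = pvBlocks (pvSpl c.toList) ++ [' '] := by
    rw [pvBlocks_eq _ hTne, hjoin]
  have hidx := index?_map_ofList (pvSpl c.toList) lhs
  have hmapid : ((pvSpl c.toList).map String.ofList).map String.toList = pvSpl c.toList := by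
    simp [List.map_map, Function.comp_def, String.toList_ofList]
  by_cases hsp : PySem.Str.isIn " " lhs
  · -- ' ' occurs in lhs: no token can equal lhs, both sides return current_str
    rw [if_pos hsp]
    have hmem : ' ' ∈ lhs.toList := by
      have := (PySem.Str.isIn_iff_infix _ _).mp hsp
      rw [hsep] at this
      exact (List.singleton_infix_iff _ _).mp this
    have hnone : PySem.List.index? (pvSpl c.toList) lhs.toList = none :=
      (PySem.List.index?_eq_none_iff _ _).mpr (fun hmemT => (hTfree _ hmemT) hmem)
    rw [hidx, hnone]
    simp only [PySem.Str.join, hsep, List.nil_append, hmapid, hjoin, String.ofList_toList]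
  · rw [if_neg hsp]
    have hnmem : ' ' ∉ lhs.toList := fun hm =>
      hsp ((PySem.Str.isIn_iff_infix _ _).mpr
        (by rw [hsep]; exact (List.singleton_infix_iff _ _).mpr hm))
    rw [hidx]
    cases hix : PySem.List.index? (pvSpl c.toList) lhs.toList with
    | none =>
      have hLnot : lhs.toList ∉ pvSpl c.toList := (PySem.List.index?_eq_none_iff _ _).mp hix
      have hfind : PySem.Chars.find (' ' :: c.toList ++ [' ']) (' ' :: lhs.toList ++ [' ']) = -1 := by
        rw [hpadded]
        exact find_padded_none _ hTfree _ hnmem hLnot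
      rw [hfind, if_pos rfl]
      simp only [PySem.Str.join, hsep, List.nil_append, hmapid, hjoin, String.ofList_toList]
    | some j =>
      obtain ⟨hj, hTj, hmin⟩ := PySem.List.getElem_of_index?_eq_some hix
      have hfind : PySem.Chars.find (' ' :: c.toList ++ [' ']) (' ' :: lhs.toList ++ [' ']) = (pvPos (pvSpl c.toList) j : Int) := by
        rw [hpadded]
        exact find_padded_some _ hTfree _ hnmem j hj hTj (fun k hk hkj => hmin k hkj)
      have hne : (pvPos (pvSpl c.toList) j : Int) ≠ -1 := by omega
      rw [hfind, if_neg hne, hpadded]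
      rw [show ((pvPos (pvSpl c.toList) j : Int)).toNat = pvPos (pvSpl c.toList) j from Int.toNat_natCast _]
      rw [padded_take _ _ j hj hTj, padded_drop _ _ j hj hTj]
      have hset : (pvSpl c.toList).set j sub.toList
          = (pvSpl c.toList).take j ++ sub.toList :: (pvSpl c.toList).drop (j + 1) :=
        List.set_eq_take_cons_drop _ hj
      have hres : pvBlocks ((pvSpl c.toList).take j) ++ [' '] ++ sub.toList
            ++ (pvBlocks ((pvSpl c.toList).drop (j + 1)) ++ [' '])
          = pvBlocks ((pvSpl c.toList).set j sub.toList) ++ [' '] := by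
        rw [hset, pvBlocks_append]
        simp [pvBlocks]
      rw [hres]
      have hsetne : (pvSpl c.toList).set j sub.toList ≠ [] := by
        intro hnil
        have hlen : (pvSpl c.toList).length = 0 := by
          simpa using congrArg List.length hnil
        omega
      rw [padded_strip _ hsetne]
      -- A's side: join of the set-mapped token list is the same join
      simp only [PySem.Str.join, hsep]
      congr 1
      rw [List.nil_append, List.map_set, hmapid]
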